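-- pv_equiv track=rewrite | github.com/PoilZero/TrustRL-Differ | utils/trim_c_dataset.py | parse_impl_type
-- ===== SOURCE A (Python) =====
-- from typing import Dict, List, Optional, Tuple
--
-- def parse_impl_type(fragment: str) -> Optional[str]:
--     # Parse type name from an impl fragment. This is conservative.
--     frag = fragment.strip()
--     if not frag.startswith("impl"):
--         return None
--     rest = frag[4:].strip()
--     # Skip generics
--     if rest.startswith("<"):
--         depth = 0
--         i = 0
--         while i < len(rest):
--             if rest[i] == "<":
--                 depth += 1
--             elif rest[i] == ">":
--                 depth -= 1
--                 if depth == 0: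
--                     i += 1
--                     break
--             i += 1
--         rest = rest[i:].strip()
--     # Collect identifiers until '{' or 'where'
--     tokens = []
--     i = 0
--     while i < len(rest):
--         if rest[i] == "{":
--             break
--         if rest.startswith("where", i):
--             break
--         if rest[i].isalnum() or rest[i] == "_":
--             j = i
--             while j < len(rest) and (rest[j].isalnum() or rest[j] == "_"):
--                 j += 1
--             tokens.append(rest[i:j])
--             i = j
--             continue
--         i += 1
--     if not tokens:
--         return None
--     if "for" in tokens:
--         # Use the identifier after the last 'for'
--         for_idx = len(tokens) - 1 - tokens[::-1].index("for")
--         if for_idx + 1 < len(tokens):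
--             return tokens[for_idx + 1]
--     return tokens[0]
-- ===== SOURCE B (Python) =====
-- def _is_word(c):
--     return c.isalnum() or c == "_"
--
-- def _generics_end(s):
--     depth = 0
--     for i, c in enumerate(s):
--         if c == "<":
--             depth += 1
--         elif c == ">":
--             depth -= 1
--             if depth == 0:
--                 return i + 1
--     return len(s)
--
-- def parse_impl_type(fragment):
--     frag = fragment.strip()
--     if not frag.startswith("impl"):
--         return None
--     rest = frag[4:].strip()
--     if rest.startswith("<"):
--         rest = rest[_generics_end(rest):].strip()
--     brace = rest.find("{")
--     head = rest if brace < 0 else rest[:brace]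
--     # cut at the first "where" that starts at a word boundary
--     for p in range(len(head)):
--         if head.startswith("where", p) and (p == 0 or not _is_word(head[p - 1])):
--             head = head[:p]
--             break
--     tokens = "".join(c if _is_word(c) else " " for c in head).split()
--     if not tokens:
--         return None
--     prev = None
--     for t in reversed(tokens):
--         if t == "for":
--             return prev if prev is not None else tokens[0]
--         prev = t
--     return tokens[0]
-- ===== Notes on version B (the rewrite author's own statement) =====
-- stated objective: idiomatic
-- what changed: A's single position-by-position scanner (interleaving the brace check, the offset startswith-where check and an inner word-consuming while loop) is replaced by a pipeline: truncate at the first brace, cut at the first word-boundary occurrence of the where keyword, blank out non-word characters and split for the tokens; and A's reverse-index arithmetic for the token after the last for-keyword is replaced by one reversed scan carrying the previous token.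
import Mathlib
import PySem

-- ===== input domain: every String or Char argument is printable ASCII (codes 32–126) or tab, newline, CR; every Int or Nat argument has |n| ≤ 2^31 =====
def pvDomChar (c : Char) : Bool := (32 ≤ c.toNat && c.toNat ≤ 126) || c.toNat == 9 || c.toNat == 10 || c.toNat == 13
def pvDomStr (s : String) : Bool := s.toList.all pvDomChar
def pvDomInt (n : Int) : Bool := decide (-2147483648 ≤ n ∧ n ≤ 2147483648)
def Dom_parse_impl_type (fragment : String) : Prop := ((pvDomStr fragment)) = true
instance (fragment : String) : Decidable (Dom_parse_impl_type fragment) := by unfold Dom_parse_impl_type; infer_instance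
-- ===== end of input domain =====

-- B re-implements A's tokenizer as a truncate-then-split pipeline and the last-'for' search as a
-- single reversed scan ('idiomatic'; same asymptotic cost). Return values are proved equal for all inputs.

-- ===== PORT A =====
-- A's inline test `rest[i].isalnum() or rest[i] == "_"`
def pvIsWordA (c : Char) : Bool := PySem.Chars.isalnum c || c == '_'

-- A's `while` loop over the generics `<…>`: depth counter, returns `rest[i:]` at the break
def pvSkipGenA : List Char → Int → List Char
  | [], _ => []
  | c :: t, depth =>
      if c = '<' then pvSkipGenA t (depth + 1)
      else if c = '>' then (if depth - 1 = 0 then t else pvSkipGenA t (depth - 1))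
      else pvSkipGenA t depth

-- A's token-collecting `while` loop: break at '{' or at `rest.startswith("where", i)`,
-- inner `while` consuming a word run = takeWhile/dropWhile over the same suffix
def pvTokensA (s : List Char) : List (List Char) :=
  match s with
  | [] => []
  | c :: t =>
      if c = '{' then []
      else if PySem.Chars.startswith (c :: t) "where".toList then []
      else if hw : pvIsWordA c = true then
        (c :: t).takeWhile pvIsWordA :: pvTokensA ((c :: t).dropWhile pvIsWordA)
      else pvTokensA t
termination_by s.length
decreasing_by
  all_goals simp only [List.dropWhile_cons, hw, if_true, List.length_cons]
  · exact Nat.lt_succ_of_le (List.length_dropWhile_le _ t)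
  · exact Nat.lt_succ_self _

def parse_impl_type (fragment : String) : Option String :=
  let frag := PySem.Chars.strip fragment.toList
  if ¬ (PySem.Chars.startswith frag "impl".toList = true) then none
  else
    let rest0 := PySem.Chars.strip (PySem.List.slice frag (some 4) none)
    let rest :=
      if PySem.Chars.startswith rest0 "<".toList then PySem.Chars.strip (pvSkipGenA rest0 0)
      else rest0
    let tokens := (pvTokensA rest).map String.mk
    if tokens = [] then none
    else if tokens.contains "for" then
      match PySem.List.index? tokens.reverse "for" with
      | some k =>
          let for_idx : Int := (tokens.length : Int) - 1 - (k : Int)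
          if for_idx + 1 < (tokens.length : Int) then PySem.List.pyGet? tokens (for_idx + 1)
          else PySem.List.pyGet? tokens 0
      | none => PySem.List.pyGet? tokens 0
    else PySem.List.pyGet? tokens 0

-- ===== PORT B =====
-- Source B `_is_word`
def pvIsWordB (c : Char) : Bool := PySem.Chars.isalnum c || c == '_'

-- Source B `_generics_end`: enumerate with a depth counter, return i+1 (or len(s))
def pvGenericsEnd : List Char → Int → Nat
  | [], _ => 0
  | c :: t, depth =>
      if c = '<' then pvGenericsEnd t (depth + 1) + 1
      else if c = '>' then (if depth - 1 = 0 then 1 else pvGenericsEnd t (depth - 1) + 1)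
      else pvGenericsEnd t depth + 1

-- Source B's boundary-'where' loop + `head[:p]` slice, as the obvious scan carrying `_is_word(head[p-1])`
def pvCutWhere : Bool → List Char → List Char
  | _, [] => []
  | pw, c :: t =>
      if !pw && PySem.Chars.startswith (c :: t) "where".toList then []
      else c :: pvCutWhere (pvIsWordB c) t

-- Source B `c if _is_word(c) else " "`
def pvBlank (c : Char) : Char := if pvIsWordB c then c else ' '

-- Source B's `for t in reversed(tokens)` loop carrying `prev`
def pvLastForNext : Option String → List String → Option String
  | _, [] => none
  | prev, t :: r => if t = "for" then prev else pvLastForNext (some t) r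

def parse_impl_type_alt (fragment : String) : Option String :=
  let frag := PySem.Chars.strip fragment.toList
  if ¬ (PySem.Chars.startswith frag "impl".toList = true) then none
  else
    let rest0 := PySem.Chars.strip (PySem.List.slice frag (some 4) none)
    let rest :=
      if PySem.Chars.startswith rest0 "<".toList then
        PySem.Chars.strip (rest0.drop (pvGenericsEnd rest0 0))
      else rest0
    let brace := PySem.Chars.find rest "{".toList
    let head := if brace < 0 then rest else PySem.List.slice rest none (some brace)
    let head2 := pvCutWhere false head
    let tokens := (PySem.Chars.split₀ (head2.map pvBlank)).map String.mk
    if tokens = [] then none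
    else
      match pvLastForNext none tokens.reverse with
      | some t => some t
      | none => PySem.List.pyGet? tokens 0

-- ===== PRECONDITION & SPEC =====
def Spec_parse_impl_type (fragment : String) (out : Option String) : Prop := out = parse_impl_type_alt fragment
instance (fragment : String) (out : Option String) : Decidable (Spec_parse_impl_type fragment out) := by unfold Spec_parse_impl_type; infer_instance

-- ===== CLAIM (what is proved, stated in full; the proofs are below) =====
def Claim_equal_parse_impl_type : Prop := ∀ (fragment : String), Dom_parse_impl_type fragment → Spec_parse_impl_type fragment (parse_impl_type fragment)

-- ===== LEMMAS AND PROOFS =====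

-- word characters are never Python whitespace
lemma pvWord_not_space (c : Char) (h : pvIsWordB c = true) : PySem.Chars.isspace c = false := by
  have hn : 48 ≤ c.toNat ∧ c.toNat ≤ 57 ∨ 65 ≤ c.toNat ∧ c.toNat ≤ 90 ∨
      97 ≤ c.toNat ∧ c.toNat ≤ 122 ∨ c.toNat = 95 := by
    simp only [pvIsWordB, PySem.Chars.isalnum, PySem.Chars.isalpha, PySem.Chars.isdigit,
      PySem.Chars.isupper, PySem.Chars.islower, Bool.or_eq_true, Bool.and_eq_true,
      decide_eq_true_eq, beq_iff_eq, Char.le_def, UInt32.le_iff_toNat_le] at h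
    rcases h with ((⟨h1, h2⟩ | ⟨h1, h2⟩) | ⟨h1, h2⟩) | h
    · exact Or.inr (Or.inl ⟨h1, h2⟩)
    · exact Or.inr (Or.inr (Or.inl ⟨h1, h2⟩))
    · exact Or.inl ⟨h1, h2⟩
    · subst h; decide
  simp only [PySem.Chars.isspace, Bool.or_eq_false_iff, Bool.and_eq_false_iff,
    decide_eq_false_iff_not, Char.toNat] at *
  omega

lemma pvWord_ne_brace (c : Char) (h : pvIsWordB c = true) : c ≠ '{' := by
  rintro rfl
  exact absurd h (by decide)

lemma pvIsWordA_eq : pvIsWordA = pvIsWordB := rfl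

-- ===== L1: generics skipping =====
lemma pvSkipGen_eq (s : List Char) : ∀ d, pvSkipGenA s d = s.drop (pvGenericsEnd s d) := by
  induction s with
  | nil => intro d; rfl
  | cons c t ih =>
      intro d
      by_cases h1 : c = '<'
      · simp [pvSkipGenA, pvGenericsEnd, h1, ih]
      · by_cases h2 : c = '>'
        · by_cases h3 : d - 1 = 0 <;>
            simp [pvSkipGenA, pvGenericsEnd, h2, h3, ih]
        · simp [pvSkipGenA, pvGenericsEnd, h1, h2, ih]

-- ===== split₀ accumulator lemmas =====
lemma pvGo_acc (s : List Char) : ∀ cur acc,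
    PySem.Chars.split₀.go s cur acc = acc.reverse ++ PySem.Chars.split₀.go s cur [] := by
  induction s with
  | nil =>
      intro cur acc
      by_cases h : cur.isEmpty <;> simp [PySem.Chars.split₀.go, h]
  | cons c t ih =>
      intro cur acc
      by_cases hs : PySem.Chars.isspace c
      · by_cases hc : cur.isEmpty
        · simp only [PySem.Chars.split₀.go, hs, hc, if_true]
          exact ih [] acc
        · simp only [PySem.Chars.split₀.go, hs, hc, if_true, if_false, Bool.false_eq_true]
          rw [ih [] (cur.reverse :: acc), ih [] [cur.reverse]]
          simp
      · simp only [PySem.Chars.split₀.go, hs, if_false, Bool.false_eq_true]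
        exact ih (c :: cur) acc

lemma pvGo_words (tok : List Char) : ∀ v cur acc, (∀ c ∈ tok, PySem.Chars.isspace c = false) →
    PySem.Chars.split₀.go (tok ++ v) cur acc = PySem.Chars.split₀.go v (tok.reverse ++ cur) acc := by
  induction tok with
  | nil => intro v cur acc _; simp
  | cons c t ih =>
      intro v cur acc h
      have hc : PySem.Chars.isspace c = false := h c (by simp)
      simp only [List.cons_append, PySem.Chars.split₀.go, hc, Bool.false_eq_true, if_false]
      rw [ih v (c :: cur) acc (fun x hx => h x (by simp [hx]))]
      simp

lemma pvSplit₀_space_cons (c : Char) (v : List Char) (h : PySem.Chars.isspace c = true) :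
    PySem.Chars.split₀ (c :: v) = PySem.Chars.split₀ v := by
  simp [PySem.Chars.split₀, PySem.Chars.split₀.go, h]

lemma pvSplit₀_tok (tok v : List Char) (hne : tok ≠ [])
    (hw : ∀ c ∈ tok, PySem.Chars.isspace c = false)
    (hv : v = [] ∨ ∃ c v', v = c :: v' ∧ PySem.Chars.isspace c = true) :
    PySem.Chars.split₀ (tok ++ v) = tok :: PySem.Chars.split₀ v := by
  unfold PySem.Chars.split₀
  rw [pvGo_words tok v [] [] hw]
  rcases hv with rfl | ⟨c, v', rfl, hc⟩
  · simp [PySem.Chars.split₀.go, hne]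
  · simp only [PySem.Chars.split₀.go, hc, if_true, List.append_nil]
    have hemp : (tok.reverse).isEmpty = false := by
      simp [hne]
    simp only [hemp, Bool.false_eq_true, if_false]
    rw [pvGo_acc, pvGo_acc v' [] []]
    simp

-- ===== brace truncation = takeWhile (· ≠ '{') =====
lemma pvTakeWhile_eq_take (s : List Char) : ∀ k u, s.drop k = '{' :: u →
    (∀ i < k, ¬ ['{'] <+: s.drop i) → s.takeWhile (fun c => !(c == '{')) = s.take k := by
  induction s with
  | nil => intro k u hk _; simp at hk
  | cons c t ih =>
      intro k u hk hmin
      match k with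
      | 0 =>
          simp only [List.drop_zero] at hk
          cases hk
          simp
      | k + 1 =>
          have hc : c ≠ '{' := by
            rintro rfl
            exact hmin 0 (Nat.succ_pos _) ⟨t, by simp⟩
          simp only [List.takeWhile_cons, List.take_succ_cons]
          rw [if_pos (by simp [hc])]
          rw [ih k u (by simpa using hk)
            (fun i hi => by simpa using hmin (i + 1) (by omega))]

lemma pvHead_eq_takeWhile (rest : List Char) :
    (if PySem.Chars.find rest "{".toList < 0 then rest
      else PySem.List.slice rest none (some (PySem.Chars.find rest "{".toList))) =
    rest.takeWhile (fun c => !(c == '{')) := by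
  have hbl : "{".toList = ['{'] := rfl
  by_cases h : PySem.Chars.find rest "{".toList < 0
  · have hneg : PySem.Chars.find rest "{".toList = -1 := by
      have := PySem.Chars.neg_one_le_find rest "{".toList
      omega
    have hnin : ¬ ("{".toList <:+: rest) := (PySem.Chars.find_eq_neg_one_iff _ _).mp hneg
    rw [if_pos h]
    have hall : ∀ c ∈ rest, (!(c == '{')) = true := by
      intro c hc
      simp only [Bool.not_eq_eq_eq_not, Bool.not_true, beq_eq_false_iff_ne, ne_eq]
      rintro rfl
      obtain ⟨l₁, l₂, hl⟩ := List.append_of_mem hc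
      exact hnin ⟨l₁, l₂, by simp [hl, hbl]⟩
    simp [List.takeWhile_eq_self_iff.mpr hall]
  · rw [if_neg h]
    have h0 : 0 ≤ PySem.Chars.find rest "{".toList := by omega
    obtain ⟨hpre, hmin⟩ := PySem.Chars.find_spec (s := rest) (sub := "{".toList) h0
    rw [PySem.List.slice_to rest h0]
    set k := (PySem.Chars.find rest "{".toList).toNat with hkdef
    obtain ⟨u, hu⟩ := hpre
    rw [hbl] at hu hmin
    exact (pvTakeWhile_eq_take rest k u (by simpa using hu.symm)
      (fun i hi => hmin i hi)).symm

-- ===== L2: the tokenizer =====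
lemma pvCutWhere_true_words (tok : List Char) : ∀ v, (∀ c ∈ tok, pvIsWordB c = true) →
    pvCutWhere true (tok ++ v) = tok ++ pvCutWhere true v := by
  induction tok with
  | nil => intro v _; rfl
  | cons c t ih =>
      intro v h
      simp only [List.cons_append, pvCutWhere, Bool.not_true, Bool.false_and, Bool.false_eq_true,
        if_false, h c (by simp)]
      rw [ih v (fun x hx => h x (by simp [hx]))]

lemma pvCutWhere_true_eq_false (v : List Char)
    (hv : v = [] ∨ ∃ c v', v = c :: v' ∧ pvIsWordB c = false) :
    pvCutWhere true v = pvCutWhere false v := by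
  rcases hv with rfl | ⟨c, v', rfl, hc⟩
  · rfl
  · have hpre : PySem.Chars.startswith (c :: v') "where".toList = false := by
      rw [Bool.eq_false_iff]
      intro hsw
      obtain ⟨u, hu⟩ := (PySem.Chars.startswith_iff _ _).mp hsw
      have h5 : "where".toList = 'w' :: 'h' :: 'e' :: 'r' :: 'e' :: [] := rfl
      rw [h5] at hu
      simp only [List.cons_append] at hu
      injection hu with h1 _
      rw [← h1] at hc
      exact absurd hc (by decide)
    simp [pvCutWhere]
    simpa using hpre

-- first char is not 'w' (e.g. not a word char) → no 'where' prefix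
lemma pvStartswith_where_false (c : Char) (t : List Char) (hc : c ≠ 'w') :
    PySem.Chars.startswith (c :: t) "where".toList = false := by
  rw [Bool.eq_false_iff]
  intro hsw
  obtain ⟨u, hu⟩ := (PySem.Chars.startswith_iff _ _).mp hsw
  have h5 : "where".toList = 'w' :: 'h' :: 'e' :: 'r' :: 'e' :: [] := rfl
  rw [h5] at hu
  simp only [List.cons_append] at hu
  injection hu with h1 _
  exact hc h1.symm

lemma pvMapBlank_words (l : List Char) (h : ∀ x ∈ l, pvIsWordB x = true) :
    l.map pvBlank = l := by
  induction l with
  | nil => rfl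
  | cons c t ih =>
      rw [List.map_cons, ih (fun x hx => h x (by simp [hx]))]
      have hc : pvBlank c = c := by simp [pvBlank, h c (by simp)]
      rw [hc]

-- a nonempty run of word characters passes through pvCutWhere unchanged
lemma pvCutWhere_tok (c : Char) (t' v : List Char)
    (hw : ∀ x ∈ c :: t', pvIsWordB x = true)
    (hnw : PySem.Chars.startswith (c :: (t' ++ v)) "where".toList = false) :
    pvCutWhere false (c :: (t' ++ v)) = c :: (t' ++ pvCutWhere true v) := by
  simp only [pvCutWhere, hnw, Bool.not_false, Bool.true_and, Bool.false_eq_true, if_false,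
    hw c (by simp), List.cons.injEq, true_and]
  exact pvCutWhere_true_words t' v (fun x hx => hw x (by simp [hx]))

-- main tokenizer lemma
lemma pvTokens_eq (n : Nat) : ∀ (s : List Char), s.length ≤ n →
    pvTokensA s = PySem.Chars.split₀
      ((pvCutWhere false (s.takeWhile (fun c => !(c == '{')))).map pvBlank) := by
  induction n with
  | zero =>
      intro s hs
      have : s = [] := List.eq_nil_of_length_eq_zero (Nat.le_zero.mp hs)
      subst this
      rw [pvTokensA]
      rfl
  | succ n ih =>
      intro s hs
      match s with
      | [] => rw [pvTokensA]; rfl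
      | c :: t =>
        have ht : t.length ≤ n := by simpa using hs
        by_cases hbrace : c = '{'
        · subst hbrace
          rw [pvTokensA]
          simp only [if_true]
          rfl
        · by_cases hwh : PySem.Chars.startswith (c :: t) "where".toList = true
          · rw [pvTokensA]
            simp only [hbrace, if_false, hwh, if_true]
            obtain ⟨u, hu⟩ := (PySem.Chars.startswith_iff _ _).mp hwh
            have h5 : "where".toList = 'w' :: 'h' :: 'e' :: 'r' :: 'e' :: [] := rfl
            rw [h5] at hu
            rw [← hu]
            simp only [List.cons_append, List.nil_append]
            have hsw5 : PySem.Chars.startswith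
                ('w' :: 'h' :: 'e' :: 'r' :: 'e' :: u.takeWhile (fun c => !(c == '{')))
                "where".toList = true :=
              (PySem.Chars.startswith_iff _ _).mpr
                ⟨u.takeWhile (fun c => !(c == '{')), by rw [h5]; simp⟩
            have htk : ('w' :: 'h' :: 'e' :: 'r' :: 'e' :: u).takeWhile (fun c => !(c == '{')) =
                'w' :: 'h' :: 'e' :: 'r' :: 'e' :: u.takeWhile (fun c => !(c == '{')) := rfl
            rw [htk]
            have hcw5 : pvCutWhere false
                ('w' :: 'h' :: 'e' :: 'r' :: 'e' :: u.takeWhile (fun c => !(c == '{'))) = [] := by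
              simp only [pvCutWhere, hsw5, Bool.not_false, Bool.true_and, if_true]
            rw [hcw5]
            rfl
          · rw [pvTokensA]
            simp only [hbrace, if_false, hwh, Bool.false_eq_true]
            by_cases hw : pvIsWordA c = true
            · rw [dif_pos hw]
              -- the word-token case
              set tok := (c :: t).takeWhile pvIsWordA with htokdef
              set u := (c :: t).dropWhile pvIsWordA with hudef
              have hsplit : tok ++ u = c :: t := List.takeWhile_append_dropWhile
              have htokw : ∀ x ∈ tok, pvIsWordB x = true := by
                intro x hx
                rw [htokdef] at hx
                exact List.mem_takeWhile_imp hx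
              have htokne : tok ≠ [] := by
                rw [htokdef, List.takeWhile_cons, if_pos hw]
                simp
              -- B's takeWhile splits the same way
              have htw : (c :: t).takeWhile (fun c => !(c == '{')) =
                  tok ++ u.takeWhile (fun c => !(c == '{')) := by
                rw [← hsplit, List.takeWhile_append_of_pos]
                intro x hx
                simp only [Bool.not_eq_eq_eq_not, Bool.not_true, beq_eq_false_iff_ne, ne_eq]
                exact pvWord_ne_brace x (htokw x hx)
              rw [htw]
              set v := u.takeWhile (fun c => !(c == '{')) with hvdef
              clear_value tok u v
              -- u starts with a non-word char (or is empty), hence so does v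
              have huv : v = [] ∨ ∃ d v', v = d :: v' ∧ pvIsWordB d = false := by
                cases hue : u with
                | nil => left; rw [hvdef, hue]; rfl
                | cons d u' =>
                    have hd : pvIsWordA d = false := by
                      have hh : (c :: t).dropWhile pvIsWordA = d :: u' := by rw [← hudef, hue]
                      have h2 : (c :: t).dropWhile pvIsWordA ≠ [] := by rw [hh]; simp
                      have h3 := List.head_dropWhile_not (p := pvIsWordA) (l := c :: t) h2
                      simp only [hh, List.head_cons] at h3
                      exact h3
                    by_cases hdb : d = '{'
                    · left
                      rw [hvdef, hue, List.takeWhile_cons]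
                      rw [if_neg (by simp [hdb])]
                    · right
                      refine ⟨d, u'.takeWhile (fun c => !(c == '{')), ?_, hd⟩
                      rw [hvdef, hue, List.takeWhile_cons, if_pos (by simp [hdb])]
              have hnwtv : PySem.Chars.startswith (tok ++ v) "where".toList = false := by
                rw [Bool.eq_false_iff]
                intro hsw
                obtain ⟨w1, hw1⟩ := (PySem.Chars.startswith_iff _ _).mp hsw
                apply hwh
                apply (PySem.Chars.startswith_iff _ _).mpr
                refine ⟨w1 ++ u.dropWhile (fun c => !(c == '{')), ?_⟩
                calc "where".toList ++ (w1 ++ u.dropWhile (fun c => !(c == '{')))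
                    = ("where".toList ++ w1) ++ u.dropWhile (fun c => !(c == '{')) := by
                      rw [List.append_assoc]
                  _ = (tok ++ v) ++ u.dropWhile (fun c => !(c == '{')) := by rw [hw1]
                  _ = tok ++ (v ++ u.dropWhile (fun c => !(c == '{'))) := by rw [List.append_assoc]
                  _ = tok ++ u := by
                      congr 1
                      rw [hvdef]
                      exact List.takeWhile_append_dropWhile
                  _ = c :: t := hsplit
              -- push the token through pvCutWhere
              obtain ⟨c0, t0, htok0⟩ := List.exists_cons_of_ne_nil htokne
              have hcw : pvCutWhere false (tok ++ v) = tok ++ pvCutWhere false v := by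
                rw [htok0, List.cons_append]
                rw [pvCutWhere_tok c0 t0 v (htok0 ▸ htokw)
                  (by rw [← List.cons_append, ← htok0]; exact hnwtv)]
                rw [pvCutWhere_true_eq_false v huv, List.cons_append]
              rw [hcw, List.map_append, pvMapBlank_words tok htokw]
              -- split off the first token from split₀
              have hmapv : (pvCutWhere false v).map pvBlank = [] ∨
                  ∃ e w', (pvCutWhere false v).map pvBlank = e :: w' ∧ PySem.Chars.isspace e = true := by
                rcases huv with hveq | ⟨d, v', hveq, hd⟩
                · left; rw [hveq]; rfl
                · have hdw : d ≠ 'w' := by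
                    rintro rfl; exact absurd hd (by decide)
                  rw [hveq]
                  simp only [pvCutWhere, pvStartswith_where_false d v' hdw, Bool.not_false,
                    Bool.true_and, Bool.false_eq_true, if_false, List.map_cons]
                  right
                  refine ⟨pvBlank d, (pvCutWhere (pvIsWordB d) v').map pvBlank, rfl, ?_⟩
                  simp only [pvBlank, hd, Bool.false_eq_true, if_false]
                  decide
              have hsp : PySem.Chars.split₀ (tok ++ (pvCutWhere false v).map pvBlank) =
                  tok :: PySem.Chars.split₀ ((pvCutWhere false v).map pvBlank) := by
                apply pvSplit₀_tok tok _ htokne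
                · intro x hx; exact pvWord_not_space x (htokw x hx)
                · rcases hmapv with h | ⟨e, w', he, hesp⟩
                  · left; exact h
                  · right; exact ⟨e, w', he, hesp⟩
              rw [hsp]
              have hulen : u.length ≤ n := by
                rw [hudef]
                calc ((c :: t).dropWhile pvIsWordA).length
                    = (t.dropWhile pvIsWordA).length := by
                      rw [List.dropWhile_cons, if_pos hw]
                  _ ≤ t.length := List.length_dropWhile_le _ _
                  _ ≤ n := ht
              rw [ih u hulen, hvdef]
            · rw [dif_neg hw]
              -- non-word, non-brace, non-where head: both sides skip c
              have hcw' : c ≠ 'w' := by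
                rintro rfl; exact hw (by decide)
              rw [List.takeWhile_cons, if_pos (by
                simp only [Bool.not_eq_eq_eq_not, Bool.not_true, beq_eq_false_iff_ne, ne_eq]
                exact hbrace)]
              rw [show pvCutWhere false (c :: t.takeWhile (fun c => !(c == '{'))) =
                  c :: pvCutWhere (pvIsWordB c) (t.takeWhile (fun c => !(c == '{'))) from by
                simp only [pvCutWhere, pvStartswith_where_false c _ hcw', Bool.not_false,
                  Bool.true_and, Bool.false_eq_true, if_false]]
              simp only [List.map_cons]
              rw [show pvBlank c = ' ' from by
                simp only [pvBlank]
                rw [if_neg (by rw [← pvIsWordA_eq]; simp [hw])]]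
              rw [pvSplit₀_space_cons ' ' _ (by decide)]
              rw [show pvIsWordB c = false from by rw [← pvIsWordA_eq]; simpa using hw]
              exact ih t ht

-- ===== L3: selection =====
lemma pvLastFor_eq (r : List String) : ∀ prev,
    pvLastForNext prev r =
      match PySem.List.index? r "for" with
      | none => none
      | some k => if k = 0 then prev else r[k - 1]? := by
  induction r with
  | nil => intro prev; rfl
  | cons t rs ih =>
      intro prev
      by_cases ht : t = "for"
      · subst ht
        simp [pvLastForNext, PySem.List.index?, List.idxOf?_cons]
      · have hbeq : (t == "for") = false := by simp [ht]
        simp only [pvLastForNext, ht, if_false]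
        rw [ih (some t)]
        simp only [PySem.List.index?, List.idxOf?_cons, beq_iff_eq]
        rw [if_neg (by simpa using ht)]
        cases h : List.idxOf? "for" rs with
        | none => rfl
        | some k =>
            cases k with
            | zero => simp
            | succ j => simp

theorem pv_main (fragment : String) : parse_impl_type fragment = parse_impl_type_alt fragment := by
  unfold parse_impl_type parse_impl_type_alt
  by_cases himpl : PySem.Chars.startswith (PySem.Chars.strip fragment.toList) "impl".toList = true
  · simp only [himpl, not_true, if_false]
    set rest0 := PySem.Chars.strip
      (PySem.List.slice (PySem.Chars.strip fragment.toList) (some 4) none) with hrest0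
    rw [pvSkipGen_eq rest0 0]
    set rest := if PySem.Chars.startswith rest0 "<".toList = true then
        PySem.Chars.strip (rest0.drop (pvGenericsEnd rest0 0))
      else rest0 with hrest
    have htok : pvTokensA rest = PySem.Chars.split₀
        ((pvCutWhere false
          (if PySem.Chars.find rest "{".toList < 0 then rest
            else PySem.List.slice rest none (some (PySem.Chars.find rest "{".toList)))).map pvBlank) := by
      rw [pvHead_eq_takeWhile rest]
      exact pvTokens_eq rest.length rest (le_refl _)
    rw [htok]
    set tokens := (PySem.Chars.split₀
        ((pvCutWhere false
          (if PySem.Chars.find rest "{".toList < 0 then rest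
            else PySem.List.slice rest none (some (PySem.Chars.find rest "{".toList)))).map pvBlank)).map
      String.mk with htokens
    clear_value tokens rest rest0
    by_cases hemp : tokens = []
    · simp [hemp]
    · simp only [hemp, if_false]
      rw [pvLastFor_eq tokens.reverse none]
      cases hidx : PySem.List.index? tokens.reverse "for" with
      | none =>
          have hnin : "for" ∉ tokens := by
            intro hmem
            exact (List.idxOf?_eq_none_iff.mp hidx) (by simpa using hmem)
          have hcont : tokens.contains "for" = false := by
            rw [Bool.eq_false_iff]
            intro hc
            exact hnin (by simpa using hc)
          simp only [hcont, Bool.false_eq_true, if_false]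
      | some k =>
          have hk := (List.idxOf?_eq_some_iff.mp hidx).fst
          rw [List.length_reverse] at hk
          have hmem : "for" ∈ tokens := by
            obtain ⟨h1, h2, _⟩ := List.idxOf?_eq_some_iff.mp hidx
            have : "for" ∈ tokens.reverse := h2 ▸ List.getElem_mem _
            simpa using this
          have hcont : tokens.contains "for" = true := List.elem_eq_true_of_mem hmem
          simp only [hcont, if_true]
          cases k with
          | zero =>
              rw [if_neg (by push_cast; omega)]
              rfl
          | succ j =>
              rw [if_pos (by push_cast; omega)]
              rw [if_neg (show ¬(j + 1 = 0) by omega)]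
              rw [show ((tokens.length : Int) - 1 - ((j + 1 : Nat) : Int) + 1) =
                  ((tokens.length - 1 - j : Nat) : Int) from by push_cast; omega]
              rw [PySem.List.pyGet?_natCast]
              rw [show (j + 1 - 1) = j from rfl]
              rw [List.getElem?_reverse (by omega)]
              rw [List.getElem?_eq_getElem (show tokens.length - 1 - j < tokens.length from by omega)]
  · rw [if_pos himpl, if_pos himpl]

-- ===== VERDICT (by name: the statement is the Claim_ definition above) =====
theorem parse_impl_type_spec : Claim_equal_parse_impl_type := by
  intro fragment _
  unfold Spec_parse_impl_type
  exact pv_main fragment
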